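-- pv_equiv track=rewrite | github.com/joonann/ProblemSolving | python/202308/24/단순2진암호코드.py | pw_sum
-- ===== SOURCE A (Python) =====
-- def pw_sum(password): # password에 int 리스트 넣어야됨
--     odd_flag = True
--     password_sum = 0
--     print_sum = 0
--     for i in range(len(password)):
--         if odd_flag:
--             password_sum += password[i] * 3
--             print_sum += password[i]
--         else:
--             password_sum += password[i]
--             print_sum += password[i]
--         odd_flag = not odd_flag
--     if password_sum % 10 == 0:
--         return print_sum
--     return 0
-- ===== SOURCE B (Python) =====
-- def pw_sum(password):
--     weighted = 3 * sum(password[0::2]) + sum(password[1::2])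
--     return sum(password) if weighted % 10 == 0 else 0
-- ===== Notes on version B (the rewrite author's own statement) =====
-- stated objective: simpler
-- what changed: Replaces the flag-toggling interleaved loop with two parity slices: weighted = 3*sum(password[0::2]) + sum(password[1::2]), returning sum(password) when weighted % 10 == 0.
import Mathlib
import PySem

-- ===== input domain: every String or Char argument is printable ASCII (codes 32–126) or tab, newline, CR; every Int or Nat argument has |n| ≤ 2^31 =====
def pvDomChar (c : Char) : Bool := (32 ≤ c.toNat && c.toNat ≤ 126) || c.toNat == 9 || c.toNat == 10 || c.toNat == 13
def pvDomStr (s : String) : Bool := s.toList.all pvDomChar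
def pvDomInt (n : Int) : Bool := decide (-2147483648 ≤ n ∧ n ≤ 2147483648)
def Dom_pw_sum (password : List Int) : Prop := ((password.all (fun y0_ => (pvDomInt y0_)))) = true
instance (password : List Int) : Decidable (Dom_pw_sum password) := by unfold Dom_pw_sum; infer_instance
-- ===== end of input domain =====

-- B replaces A's flag-toggling interleaved loop by two parity slices (3*sum(password[0::2]) + sum(password[1::2])): simpler, same cost.

-- ===== PORT A =====
def pw_sum (password : List Int) : Int :=
  -- odd_flag, password_sum, print_sum as one folded state; password[i] via pyGetD (i always in range)
  let st := (PySem.List.pyRange 0 (password.length : Int) 1).foldl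
    (fun (s : Bool × Int × Int) i =>
      if s.1 then
        (!s.1, s.2.1 + PySem.List.pyGetD password i 0 * 3, s.2.2 + PySem.List.pyGetD password i 0)
      else
        (!s.1, s.2.1 + PySem.List.pyGetD password i 0, s.2.2 + PySem.List.pyGetD password i 0))
    (true, 0, 0)
  if PySem.Int.mod st.2.1 10 == 0 then st.2.2 else 0

-- ===== PORT B =====
def pw_sum_alt (password : List Int) : Int :=
  let weighted := 3 * ((PySem.List.slice? password (some 0) none 2).getD []).sum
                  + ((PySem.List.slice? password (some 1) none 2).getD []).sum
  if PySem.Int.mod weighted 10 == 0 then password.sum else 0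

-- ===== PRECONDITION & SPEC =====
def Spec_pw_sum (password : List Int) (out : Int) : Prop := out = pw_sum_alt password
instance (password : List Int) (out : Int) : Decidable (Spec_pw_sum password out) := by unfold Spec_pw_sum; infer_instance

-- ===== CLAIM (what is proved, stated in full; the proofs are below) =====
def Claim_equal_pw_sum : Prop := ∀ (password : List Int), Dom_pw_sum password → Spec_pw_sum password (pw_sum password)

-- ===== LEMMAS AND PROOFS =====

/-- the even-indexed elements of a list -/
def pvEvens : List Int → List Int
  | [] => []
  | [x] => [x]
  | x :: _ :: r => x :: pvEvens r

theorem pvEvens_cons (x : Int) (r : List Int) : pvEvens (x :: r) = x :: pvEvens r.tail := by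
  cases r <;> rfl

theorem pvEvens_filterMap (ys : List Int) :
    List.filterMap (fun k => ys[(2 * k)]?) (List.range ((ys.length + 1)/2)) = pvEvens ys := by
  fun_induction pvEvens ys with
  | case1 => simp
  | case2 x => simp
  | case3 x y r ih =>
    have hc : ((x :: y :: r).length + 1)/2 = (r.length + 1)/2 + 1 := by simp; omega
    rw [hc, List.range_succ_eq_map, List.filterMap_cons, List.filterMap_map]
    simp only [Function.comp]
    have h2 : ∀ k : ℕ, (x :: y :: r)[(2 * (k+1))]? = r[(2*k)]? := by
      intro k
      have : 2 * (k+1) = 2*k + 2 := by omega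
      simp [this]
    simp only [h2]
    simp [ih]

theorem pvSlice0 (xs : List Int) :
    PySem.List.slice? xs (some 0) none 2 = some (pvEvens xs) := by
  unfold PySem.List.slice? PySem.List.sliceIndices
  norm_num
  have hidx : ∀ k : ℕ, ((2 * (k:ℤ)).toNat) = 2*k := by intro k; omega
  have hcnt : (if 0 < xs.length then (((xs.length:ℤ) + 2 - 1)/2).toNat else 0) = (xs.length + 1)/2 := by
    split <;> omega
  simp only [hidx, hcnt]
  exact pvEvens_filterMap xs

theorem pvSlice1 (xs : List Int) :
    PySem.List.slice? xs (some 1) none 2 = some (pvEvens xs.tail) := by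
  cases xs with
  | nil => rfl
  | cons x t =>
    unfold PySem.List.slice? PySem.List.sliceIndices
    norm_num
    have hidx : ∀ k : ℕ, (x :: t)[((1 + 2 * (k:ℤ)).toNat)]? = t[(2*k)]? := by
      intro k
      have h21 : (1 + 2 * (k:ℤ)).toNat = 2*k + 1 := by omega
      simp [h21]
    have hcnt : (if 0 < t.length then (((t.length:ℤ) + 2 - 1)/2).toNat else 0) = (t.length + 1)/2 := by
      split <;> omega
    simp only [hidx, hcnt]
    exact pvEvens_filterMap t

/-- characterisation of A's fold -/
theorem pvAfold (xs : List Int) (flag : Bool) (w t : Int) :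
    ((xs.foldl
      (fun (s : Bool × Int × Int) v =>
        if s.1 then (!s.1, s.2.1 + v * 3, s.2.2 + v)
        else (!s.1, s.2.1 + v, s.2.2 + v))
      (flag, w, t)) : Bool × Int × Int).2 =
    (w + (if flag then 3 * (pvEvens xs).sum + (pvEvens xs.tail).sum
          else (pvEvens xs).sum + 3 * (pvEvens xs.tail).sum),
     t + xs.sum) := by
  induction xs generalizing flag w t with
  | nil => cases flag <;> simp [pvEvens]
  | cons x r ih =>
    cases flag <;> simp [ih, pvEvens_cons] <;> constructor <;> ring

-- ===== VERDICT (by name: the statement is the Claim_ definition above) =====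
theorem pw_sum_spec : Claim_equal_pw_sum := by
  intro password _
  unfold Spec_pw_sum pw_sum pw_sum_alt
  rw [PySem.List.foldl_pyRange_pyGetD' password 0 (fun (s : Bool × Int × Int) v =>
        if s.1 then (!s.1, s.2.1 + v * 3, s.2.2 + v)
        else (!s.1, s.2.1 + v, s.2.2 + v)) (true, 0, 0) (by norm_num)]
  simp only [Int.toNat_zero, List.drop_zero]
  have h := pvAfold password true 0 0
  rw [Prod.ext_iff] at h
  rw [h.1, h.2, pvSlice0, pvSlice1]
  simp
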